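-- pv_equiv track=rewrite | github.com/zhixue/rosalind_codes | BA3H.py | inout_degree_node
-- ===== SOURCE A (Python) =====
-- def inout_degree_node(thegraph):
--     inout_nodes = []
--     for node1 in thegraph.keys():
--         counter = 0
--         for node2 in thegraph:
--             if node1 in thegraph[node2]:
--                 counter += 1
--         if counter != len(thegraph[node1]):
--             inout_nodes.append(node1)
--     return inout_nodes
-- ===== SOURCE B (Python) =====
-- def inout_degree_node(thegraph):
--     indeg = {}
--     for lst in thegraph.values():
--         for t in dict.fromkeys(lst):
--             indeg[t] = indeg.get(t, 0) + 1
--     return [n for n, lst in thegraph.items() if indeg.get(n, 0) != len(lst)]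
-- ===== Notes on version B (the rewrite author's own statement) =====
-- stated objective: faster
-- what changed: Instead of re-scanning every adjacency list for every node (O(V*E)), B makes one pass over the graph building an in-degree counter dict (counting each source list once via dict.fromkeys), then compares each node's count to its out-degree.
import Mathlib
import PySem

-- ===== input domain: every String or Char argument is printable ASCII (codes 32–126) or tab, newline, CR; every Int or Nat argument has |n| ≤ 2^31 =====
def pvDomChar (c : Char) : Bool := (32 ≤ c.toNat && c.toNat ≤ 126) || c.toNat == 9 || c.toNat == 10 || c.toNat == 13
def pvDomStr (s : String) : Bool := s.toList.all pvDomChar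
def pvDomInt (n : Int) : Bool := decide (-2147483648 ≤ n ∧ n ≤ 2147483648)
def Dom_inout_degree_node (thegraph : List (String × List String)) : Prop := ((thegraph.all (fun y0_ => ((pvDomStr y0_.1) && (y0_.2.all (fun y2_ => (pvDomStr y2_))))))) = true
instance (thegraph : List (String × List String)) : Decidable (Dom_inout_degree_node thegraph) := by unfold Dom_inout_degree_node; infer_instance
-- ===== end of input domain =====

-- B replaces A's per-node rescan of all adjacency lists by a single counting pass (asymptotically faster); return values agree on all dict inputs.

-- ===== PORT A =====
-- dict lookup thegraph[k]; first match (exact under Pre_: dict keys are unique; k is always present where A uses it)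
def pyDictGet (g : List (String × List String)) (k : String) : List String :=
  ((g.find? (fun p => p.1 == k)).map Prod.snd).getD []

-- A's inner loop over the dict's keys
def aCounter (thegraph : List (String × List String)) (node1 : String) : Int :=
  thegraph.foldl (fun c q => if node1 ∈ pyDictGet thegraph q.1 then c + 1 else c) 0

def inout_degree_node (thegraph : List (String × List String)) : List String :=
  thegraph.foldl (fun acc p =>
    if aCounter thegraph p.1 ≠ (pyDictGet thegraph p.1).length then acc ++ [p.1] else acc) []

-- ===== PORT B =====
-- the single counting pass: in-degree of every node, each adjacency list counted once (dict.fromkeys = dedup)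
def buildIndeg (thegraph : List (String × List String)) : PySem.Dict String Int :=
  thegraph.foldl (fun d p =>
    (PySem.List.dedup p.2).foldl (fun d t => d.modify t 0 (· + 1)) d) PySem.Dict.empty

def inout_degree_node_alt (thegraph : List (String × List String)) : List String :=
  thegraph.foldl (fun acc p =>
    if (buildIndeg thegraph).getD p.1 0 ≠ (p.2.length : Int) then acc ++ [p.1] else acc) []

-- ===== PRECONDITION & SPEC =====
-- thegraph is a Python dict, whose keys are necessarily unique; an association list with duplicate keys represents no dict input.
def Pre_inout_degree_node (thegraph : List (String × List String)) : Prop :=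
  (thegraph.map Prod.fst).Nodup
instance (thegraph : List (String × List String)) : Decidable (Pre_inout_degree_node thegraph) := by unfold Pre_inout_degree_node; infer_instance

def pvWitness_inout_degree_node : (List (String × List String)) :=
  [("a", ["b", "b"]), ("b", ["a"]), ("c", [])]

def Spec_inout_degree_node (thegraph : List (String × List String)) (out : List String) : Prop := out = inout_degree_node_alt thegraph
instance (thegraph : List (String × List String)) (out : List String) : Decidable (Spec_inout_degree_node thegraph out) := by unfold Spec_inout_degree_node; infer_instance

-- ===== CLAIM (what is proved, stated in full; the proofs are below) =====
def Claim_equal_inout_degree_node : Prop := ∀ (thegraph : List (String × List String)), Dom_inout_degree_node thegraph → Pre_inout_degree_node thegraph → Spec_inout_degree_node thegraph (inout_degree_node thegraph)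

-- ===== LEMMAS AND PROOFS =====

-- under unique keys, looking a member pair's key up returns that pair's value
theorem pyDictGet_of_mem (g : List (String × List String)) (p : String × List String)
    (hn : (g.map Prod.fst).Nodup) (hp : p ∈ g) : pyDictGet g p.1 = p.2 := by
  induction g with
  | nil => cases hp
  | cons q t ih =>
    simp only [List.map_cons, List.nodup_cons] at hn
    rcases List.mem_cons.mp hp with h | h
    · subst h; simp [pyDictGet]
    · have hne : ¬ (q.1 == p.1) = true := by
        simp only [beq_iff_eq]
        intro he
        exact hn.1 (he ▸ (List.mem_map_of_mem h))
      simpa [pyDictGet, hne] using ih hn.2 h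

-- A's inner loop counts the members of g whose value list contains n
theorem counter_eq (g : List (String × List String)) (n : String)
    (hn : (g.map Prod.fst).Nodup) :
    aCounter g n = (g.countP (fun q => n ∈ q.2) : Int) := by
  unfold aCounter
  rw [PySem.List.foldl_congr_mem g _ (fun (c : Int) q => if n ∈ q.2 then c + 1 else c) 0
      (fun c q hq => by rw [pyDictGet_of_mem g q hn hq])]
  simpa using PySem.List.foldl_count_if (fun q => decide (n ∈ q.2)) g 0

-- B's counting pass: the in-degree dict holds, for every node, the number of member lists containing it
theorem indeg_getD (g : List (String × List String)) (d : PySem.Dict String Int) (n : String) :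
    (g.foldl (fun d p => (PySem.List.dedup p.2).foldl (fun d t => d.modify t 0 (· + 1)) d) d).getD n 0
      = d.getD n 0 + (g.countP (fun q => n ∈ q.2) : Int) := by
  induction g generalizing d with
  | nil => simp
  | cons p t ih =>
    simp only [List.foldl_cons, ih, PySem.Dict.getD_foldl_modify_add_one, List.countP_cons]
    have hc : List.count n (PySem.List.dedup p.2) = if n ∈ p.2 then 1 else 0 := by
      by_cases h : n ∈ p.2
      · rw [if_pos h]
        exact List.count_eq_one_of_mem (PySem.List.nodup_dedup p.2)
          ((PySem.List.mem_dedup p.2 n).mpr h)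
      · rw [if_neg h]
        exact List.count_eq_zero.mpr (fun hm => h ((PySem.List.mem_dedup p.2 n).mp hm))
    rw [hc]
    by_cases h : n ∈ p.2 <;> simp [h] <;> ring

-- ===== VERDICT (by name: the statement is the Claim_ definition above) =====
theorem inout_degree_node_spec : Claim_equal_inout_degree_node := by
  intro g _ hpre
  unfold Spec_inout_degree_node inout_degree_node inout_degree_node_alt
  refine PySem.List.foldl_congr_mem g _ _ [] (fun acc p hp => by
    have h1 := counter_eq g p.1 hpre
    have h2 : (buildIndeg g).getD p.1 0 = (g.countP (fun q => p.1 ∈ q.2) : Int) := by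
      unfold buildIndeg
      simpa using indeg_getD g PySem.Dict.empty p.1
    have h3 := pyDictGet_of_mem g p hpre hp
    rw [h1, h2, h3])
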